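-- pv_equiv track=rewrite | github.com/TwitchPlaysPokemon/pbrEngine | pbrEngine/pbrEngine/util.py | bytesToString
-- ===== SOURCE A (Python) =====
-- def bytesToString(data):
--     '''
--     Helper method to turn a list of bytes stripped from PBR's memory
--     into a string, removing unknown/invalid characters
--     and stopping at the first "0", because they are c-strings.
--     0xfe gets replaced with a space, because it represents (part of) a line break.
--     '''
--     # remove paddings
--     data = data[1::2]
--     # replace pbr's "newline" with a space
--     data = [x if x!=0xfe else 0x20 for x in data]
--     # eliminate invalid ascii points
--     data = [x for x in data if x <= 0x7f]
--     # stop at first 0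
--     try:
--         data = data[:data.index(0)]
--     except:
--         pass
--     return bytes(data).decode()
-- ===== SOURCE B (Python) =====
-- def bytesToString(data):
--     '''Single fused pass over the payload bytes: replace 0xfe with space,
--     skip invalid (>0x7f) bytes, stop at the first 0, collect the rest.'''
--     res = bytearray()
--     for x in data[1::2]:
--         if x == 0xfe:
--             x = 0x20
--         if x > 0x7f:
--             continue
--         if x == 0:
--             break
--         res.append(x)
--     return res.decode()
-- ===== Notes on version B (the rewrite author's own statement) =====
-- stated objective: simpler
-- what changed: A's four separate passes (map to replace 0xfe, filter invalid bytes, .index(0) plus slice to truncate) are fused into one loop with continue/break that builds the result directly.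
-- outside the precondition, e.g. on bytesToString([0, -5, 0, 0]): A raises ValueError, B raises ValueError
import Mathlib
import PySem

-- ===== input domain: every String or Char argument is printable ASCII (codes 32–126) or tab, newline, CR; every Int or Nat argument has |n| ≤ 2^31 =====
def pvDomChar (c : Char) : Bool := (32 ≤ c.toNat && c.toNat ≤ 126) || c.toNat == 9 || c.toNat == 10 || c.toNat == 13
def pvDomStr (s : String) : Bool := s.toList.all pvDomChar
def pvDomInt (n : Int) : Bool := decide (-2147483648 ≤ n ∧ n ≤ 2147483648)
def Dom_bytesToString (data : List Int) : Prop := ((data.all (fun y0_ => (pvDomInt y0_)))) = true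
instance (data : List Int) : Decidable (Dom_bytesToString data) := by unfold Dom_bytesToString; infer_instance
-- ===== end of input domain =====

-- B fuses A's map/filter/index-truncate chain into one early-exit loop (objective: simpler).

-- ===== PORT A =====
def bytesToString (data : List Int) : String :=
  -- data = data[1::2]  (step 2 ≠ 0, so slice? is always some)
  let d1 := (PySem.List.slice? data (some 1) none 2).getD []
  -- data = [x if x!=0xfe else 0x20 for x in data]
  let d2 := d1.map (fun x => if x ≠ 0xfe then x else 0x20)
  -- data = [x for x in data if x <= 0x7f]
  let d3 := d2.filter (fun x => x ≤ 0x7f)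
  -- try: data = data[:data.index(0)] except: pass
  let d4 := match PySem.List.index? d3 0 with
    | some i => PySem.List.slice d3 none (some (i : Int))
    | none => d3
  -- bytes(data).decode()  (valid under Pre_: all remaining bytes are in 0..0x7f)
  String.ofList (d4.map (fun x => Char.ofNat x.toNat))

-- ===== PORT B =====
-- the fused loop of Source B: res is the accumulator, continue = skip, break = return acc
def bytesToStringGo : List Int → List Char → List Char
  | [], acc => acc
  | x :: rest, acc =>
    let x' := if x = 0xfe then 0x20 else x
    if 0x7f < x' then bytesToStringGo rest acc
    else if x' = 0 then acc
    else bytesToStringGo rest (acc ++ [Char.ofNat x'.toNat])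

def bytesToString_alt (data : List Int) : String :=
  String.ofList (bytesToStringGo ((PySem.List.slice? data (some 1) none 2).getD []) [])

-- ===== PRECONDITION & SPEC =====
-- Pre_ excludes exactly the inputs where the Pythons raise ValueError: a negative payload
-- byte occurring before the first 0 byte (bytes()/bytearray.append rejects negatives).
def Pre_bytesToString (data : List Int) : Prop :=
  ∀ x ∈ (((PySem.List.slice? data (some 1) none 2).getD []).takeWhile (fun x => x ≠ (0 : Int))), 0 ≤ x
instance (data : List Int) : Decidable (Pre_bytesToString data) := by unfold Pre_bytesToString; infer_instance
def pvWitness_bytesToString : List Int := [0, 72, 0, 254, 0, 105, 0, 200, 0, 0, 0, 74]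

def Spec_bytesToString (data : List Int) (out : String) : Prop := out = bytesToString_alt data
instance (data : List Int) (out : String) : Decidable (Spec_bytesToString data out) := by unfold Spec_bytesToString; infer_instance

-- ===== CLAIM (what is proved, stated in full; the proofs are below) =====
def Claim_equal_bytesToString : Prop := ∀ (data : List Int), Dom_bytesToString data → Pre_bytesToString data → Spec_bytesToString data (bytesToString data)

-- ===== LEMMAS AND PROOFS =====

-- A's try/except-index truncation is takeWhile (· ≠ 0)
lemma takeWhile_ne_append_zero (pre suf : List Int) (h : (0 : Int) ∉ pre) :
    (pre ++ 0 :: suf).takeWhile (fun x => x ≠ (0 : Int)) = pre := by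
  induction pre with
  | nil => simp
  | cons a t ih =>
    simp only [List.mem_cons, not_or] at h
    simpa [List.takeWhile_cons, Ne.symm h.1] using ih h.2

lemma matchIdx_eq_takeWhile (fl : List Int) :
    (match PySem.List.index? fl 0 with
      | some i => PySem.List.slice fl none (some (i : Int))
      | none => fl) = fl.takeWhile (fun x => x ≠ (0 : Int)) := by
  cases h : PySem.List.index? fl 0 with
  | none =>
    have h0 : (0 : Int) ∉ fl := (PySem.List.index?_eq_none_iff fl 0).mp h
    exact (List.takeWhile_eq_self_iff.mpr (by intro x hx; simp; rintro rfl; exact h0 hx)).symm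
  | some i =>
    obtain ⟨pre, suf, rfl, hlen, hnot⟩ := (PySem.List.index?_eq_some_iff _ 0 i).mp h
    simp only []
    rw [PySem.List.slice_to _ (Int.natCast_nonneg i), takeWhile_ne_append_zero pre suf hnot]
    simp [← hlen]

-- the two comprehension lambdas are the same function
lemma fe_lambda_eq :
    (fun x : Int => if x ≠ 0xfe then x else 0x20) = (fun x : Int => if x = 0xfe then 0x20 else x) := by
  funext x; by_cases h : x = 0xfe <;> simp [h]

-- the fused loop computes A's map/filter/takeWhile chain (over the already-sliced list)
lemma go_eq_chain (l : List Int) (acc : List Char) :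
    bytesToStringGo l acc =
      acc ++ (((l.map (fun x => if x = 0xfe then (0x20 : Int) else x)).filter
                (fun x => x ≤ 0x7f)).takeWhile (fun x => x ≠ (0 : Int))).map
                (fun x => Char.ofNat x.toNat) := by
  induction l generalizing acc with
  | nil => simp [bytesToStringGo]
  | cons x xs ih =>
    simp only [bytesToStringGo, List.map_cons, List.filter_cons]
    by_cases h1 : (0x7f : Int) < (if x = 0xfe then (0x20 : Int) else x)
    · simp [h1, not_le_of_gt h1, ih]
    · by_cases h2 : (if x = 0xfe then (0x20 : Int) else x) = 0
      · simp [h2]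
      · simp [h1, h2, le_of_not_gt h1, ih, List.append_assoc]

-- ===== VERDICT (by name: the statement is the Claim_ definition above) =====
theorem bytesToString_spec : Claim_equal_bytesToString := by
  intro data _ _
  show bytesToString data = bytesToString_alt data
  simp only [bytesToString, bytesToString_alt, fe_lambda_eq]
  rw [matchIdx_eq_takeWhile, go_eq_chain]
  simp
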